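-- pv_equiv track=rewrite | github.com/MikeLaptev/sandbox_python | leetcode/medium/string/maximum_score_from_removing_substrings.py | process
-- ===== SOURCE A (Python) =====
-- from typing import Tuple
--
-- def process(s: str, gain: str) -> Tuple[int, str]:
--     count = 0
--     q = ""
--     for i, c in enumerate(s):
--         q += c
--         if q.endswith(gain):
--             q = q[: len(q) - len(gain)]
--             count += 1
--     return count, q
-- ===== SOURCE B (Python) =====
-- def process(s, gain):
--     if not gain:
--         return 0, s
--     count = 0
--     while True:
--         i = s.find(gain)
--         if i == -1:
--             return count, s
--         s = s[:i] + s[i + len(gain):]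
--         count += 1
-- ===== Notes on version B (the rewrite author's own statement) =====
-- stated objective: faster
-- what changed: Replaces A's per-character stack/endswith suffix pass (a string concatenation and copy per character) by a search-and-delete loop: repeatedly locate the leftmost occurrence with str.find and splice it out until none remains (the stack pass removes the leftmost-ending occurrence first, so the results coincide); empty gain is handled directly.
-- intended difference: On empty gain with nonempty s, A returns (len(s), s) because every prefix ends with '' (one counted removal per character), while B returns (0, s); nothing is removable from s, so 0 removals is the intended count. — e.g. on process("a", ""): A returns (1, "a"), B returns (0, "a")
import Mathlib
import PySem

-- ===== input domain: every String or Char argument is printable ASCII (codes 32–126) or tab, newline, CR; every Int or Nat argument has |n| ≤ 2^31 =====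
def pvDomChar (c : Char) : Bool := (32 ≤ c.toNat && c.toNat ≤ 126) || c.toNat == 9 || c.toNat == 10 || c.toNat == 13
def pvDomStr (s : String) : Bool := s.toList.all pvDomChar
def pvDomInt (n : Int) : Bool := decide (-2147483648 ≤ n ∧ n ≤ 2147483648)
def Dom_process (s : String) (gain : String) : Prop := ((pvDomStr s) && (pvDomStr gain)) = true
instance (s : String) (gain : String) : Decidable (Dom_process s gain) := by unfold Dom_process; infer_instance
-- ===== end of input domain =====

-- B replaces A's per-character stack/suffix pass by repeated search-and-delete of the
-- leftmost occurrence (str.find); same value except for empty gain, stated as D_ below.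
-- ===== PORT A =====
-- A builds a string q char by char, tests q.endswith(gain), and reslices q on a match.
def aStep (g : List Char) (st : Int × List Char) (c : Char) : Int × List Char :=
  let q := st.2 ++ [c]
  if PySem.Chars.endswith q g then
    (st.1 + 1, PySem.Chars.slice q none (some ((q.length : Int) - (g.length : Int))))
  else (st.1, q)

def process (s : String) (gain : String) : Int × String :=
  let r := s.toList.foldl (aStep gain.toList) (0, [])
  (r.1, String.ofList r.2)

-- ===== PORT B =====
-- B's while-loop: find the leftmost occurrence, delete it, repeat until find = -1.
-- fuel (s.length + 1) is a totality device only: with gain ≠ [] each removal deletes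
-- ≥ 1 character, so at most s.length + 1 iterations ever run.
def bLoop (g : List Char) (fuel : Nat) (t : List Char) (cnt : Int) : Int × List Char :=
  match fuel with
  | 0 => (cnt, t)
  | Nat.succ f =>
    let i := PySem.Chars.find t g
    if i = -1 then (cnt, t)
    else bLoop g f (PySem.List.slice t none (some i) ++
                    PySem.List.slice t (some (i + (g.length : Int))) none) (cnt + 1)

def process_alt (s : String) (gain : String) : Int × String :=
  if gain.toList = [] then (0, s)
  else
    let r := bLoop gain.toList (s.toList.length + 1) s.toList 0
    (r.1, String.ofList r.2)

-- ===== PRECONDITION & SPEC =====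
-- On empty gain with nonempty s, A returns (len(s), s) — one "removal" per character,
-- an artefact of every string ending with "" — while B returns (0, s): nothing is
-- removable, so 0 removals is the intended count.
def D_process (s : String) (gain : String) : Prop := gain = "" ∧ s ≠ ""
instance (s : String) (gain : String) : Decidable (D_process s gain) := by unfold D_process; infer_instance

def Spec_process (s : String) (gain : String) (out : Int × String) : Prop :=
  ¬ D_process s gain → out = process_alt s gain
instance (s : String) (gain : String) (out : Int × String) : Decidable (Spec_process s gain out) := by unfold Spec_process; infer_instance

def pvDiffWitness_process : String × String := ("a", "")
def pvDiffWitnessOut_process : (Int × String) × (Int × String) := ((1, "a"), (0, "a"))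

-- ===== CLAIM (what is proved, stated in full; the proofs are below) =====
def Claim_unchanged_process : Prop := ∀ (s : String) (gain : String), Dom_process s gain → Spec_process s gain (process s gain)
def Claim_changed_process : Prop := Dom_process (pvDiffWitness_process.1) (pvDiffWitness_process.2) ∧ D_process (pvDiffWitness_process.1) (pvDiffWitness_process.2) ∧ process (pvDiffWitness_process.1) (pvDiffWitness_process.2) = pvDiffWitnessOut_process.1 ∧ process_alt (pvDiffWitness_process.1) (pvDiffWitness_process.2) = pvDiffWitnessOut_process.2 ∧ pvDiffWitnessOut_process.1 ≠ pvDiffWitnessOut_process.2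
def Claim_exact_process : Prop := ∀ (s : String) (gain : String), Dom_process s gain → D_process s gain → process s gain ≠ process_alt s gain

-- ===== LEMMAS AND PROOFS =====

-- find t g = i when g occurs at i and at no earlier position
theorem find_eq_of_first (t g : List Char) (i : Nat) (hi : g <+: t.drop i)
    (hmin : ∀ j, j < i → ¬ g <+: t.drop j) : PySem.Chars.find t g = (i : Int) := by
  have hinf : g <:+: t := by
    rw [← PySem.Chars.isIn_iff_infix, ← PySem.Chars.exists_prefix_drop_iff_isIn]
    exact ⟨i, hi⟩
  have hnn : 0 ≤ PySem.Chars.find t g := (PySem.Chars.find_nonneg_iff t g).mpr hinf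
  obtain ⟨h1, h2⟩ := PySem.Chars.find_spec hnn
  rcases lt_trichotomy (PySem.Chars.find t g).toNat i with h | h | h
  · exact absurd h1 (hmin _ h)
  · rw [← Int.toNat_of_nonneg hnn, h]
  · exact absurd hi (h2 i h)

-- an infix of l ++ [c] is an infix of l or a suffix of l ++ [c]
theorem infix_concat_cases (g l : List Char) (c : Char) (h : g <:+: l ++ [c]) :
    g <:+: l ∨ g <:+ (l ++ [c]) := by
  obtain ⟨u, v, huv⟩ := h
  rcases v.eq_nil_or_concat with rfl | ⟨v', d, rfl⟩
  · right; exact ⟨u, by simpa using huv⟩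
  · left
    have h' : (u ++ g ++ v') ++ [d] = l ++ [c] := by
      simpa [List.concat_eq_append, List.append_assoc] using huv
    have := congrArg List.dropLast h'
    simp at this
    exact ⟨u, v', by simpa [List.append_assoc] using this⟩

-- main invariant: with g ≠ [] and no occurrence of g inside the stack q,
-- A's remaining fold equals B's loop on q ++ cs (for any sufficient fuel)
theorem loop_eq (g : List Char) (hg : g ≠ []) (cs : List Char) :
    ∀ (q : List Char) (cnt : Int) (fuel : Nat), ¬ g <:+: q → cs.length + 1 ≤ fuel →
      List.foldl (aStep g) (cnt, q) cs = bLoop g fuel (q ++ cs) cnt := by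
  have hm : 1 ≤ g.length := List.length_pos_iff.mpr hg
  induction cs with
  | nil =>
    intro q cnt fuel hq hfuel
    obtain ⟨f, rfl⟩ : ∃ f, fuel = f + 1 := ⟨fuel - 1, by omega⟩
    have hfind : PySem.Chars.find q g = -1 := (PySem.Chars.find_eq_neg_one_iff q g).mpr hq
    simp [bLoop, hfind]
  | cons c cs' ih =>
    intro q cnt fuel hq hfuel
    obtain ⟨f, rfl⟩ : ∃ f, fuel = f + 1 := ⟨fuel - 1, by omega⟩
    have hfull : q ++ c :: cs' = (q ++ [c]) ++ cs' := by simp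
    by_cases hend : PySem.Chars.endswith (q ++ [c]) g = true
    · -- a removal: g is a suffix of q ++ [c]
      have hsuf : g <:+ (q ++ [c]) := (PySem.Chars.endswith_iff _ _).mp hend
      obtain ⟨u, hu⟩ := hsuf
      have hlen : g.length ≤ q.length + 1 := by
        have := congrArg List.length hu; simp at this; omega
      set i : Nat := q.length + 1 - g.length with hidef
      have hulen : u.length = i := by
        have := congrArg List.length hu; simp at this; omega
      have hdrop : (q ++ [c]).drop i = g := by
        rw [← hu, ← hulen, List.drop_left]
      have hiLe : i ≤ q.length + 1 := by omega
      -- first occurrence of g in the whole list is at i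
      have hocc : g <+: ((q ++ [c]) ++ cs').drop i := by
        rw [List.drop_append_of_le_length (by simpa using hiLe), hdrop]
        exact ⟨cs', rfl⟩
      have hmin : ∀ j, j < i → ¬ g <+: ((q ++ [c]) ++ cs').drop j := by
        intro j hj hp
        have hjm : j + g.length ≤ q.length := by omega
        have hgeq : g = (((q ++ [c]) ++ cs').drop j).take g.length := by
          have := List.prefix_iff_eq_take.mp hp; exact this
        have htk : ((q ++ [c]) ++ cs').take (j + g.length) = q.take (j + g.length) := by
          rw [List.append_assoc]
          exact List.take_append_of_le_length hjm
        have hsub : g <:+: q := by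
          have h1 : ((q ++ [c]) ++ cs').take (j + g.length)
              = ((q ++ [c]) ++ cs').take j ++ g := by
            rw [List.take_add, ← hgeq]
          have h2 : g <:+ q.take (j + g.length) := by
            rw [← htk, h1]; exact ⟨_, rfl⟩
          exact h2.isInfix.trans (List.take_prefix _ _).isInfix
        exact hq hsub
      have hfind : PySem.Chars.find ((q ++ [c]) ++ cs') g = (i : Int) :=
        find_eq_of_first _ _ i hocc hmin
      -- B takes one removal step
      have hslice1 : PySem.List.slice ((q ++ [c]) ++ cs') none (some (i : Int))
          = (q ++ [c]).take i := by
        rw [PySem.List.slice_to_natCast, List.take_append_of_le_length (by simpa using hiLe)]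
      have hslice2 : PySem.List.slice ((q ++ [c]) ++ cs') (some ((i : Int) + (g.length : Int))) none
          = cs' := by
        have : (i : Int) + (g.length : Int) = ((i + g.length : Nat) : Int) := by push_cast; ring
        rw [this, PySem.List.slice_from_natCast]
        have : i + g.length = (q ++ [c]).length := by simp; omega
        rw [this, List.drop_left]
      -- A's new stack
      have hAslice : PySem.Chars.slice (q ++ [c]) none
          (some (((q ++ [c]).length : Int) - (g.length : Int))) = (q ++ [c]).take i := by
        have hcast : (((q ++ [c]).length : Int) - (g.length : Int)) = ((i : Nat) : Int) := by
          simp; omega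
        rw [PySem.Chars.slice_eq_listSlice, hcast, PySem.List.slice_to_natCast]
      have hq' : ¬ g <:+: (q ++ [c]).take i := by
        intro hcon
        have hpref : (q ++ [c]).take i = q.take i :=
          List.take_append_of_le_length (by omega)
        exact hq (hcon.trans (by rw [hpref]; exact (List.take_prefix _ _).isInfix))
      have hstep : aStep g (cnt, q) c = (cnt + 1, (q ++ [c]).take i) := by
        simp only [aStep]
        rw [if_pos hend, hAslice]
      rw [hfull, List.foldl_cons, hstep]
      show List.foldl (aStep g) (cnt + 1, (q ++ [c]).take i) cs' = bLoop g (f + 1) ((q ++ [c]) ++ cs') cnt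
      rw [ih ((q ++ [c]).take i) (cnt + 1) f hq' (by simp at hfuel; omega)]
      have hne : ¬ ((i : Int) = -1) := by omega
      simp only [bLoop, hfind, hne, if_false, hslice1, hslice2]
    · -- no removal: push c
      have hq' : ¬ g <:+: (q ++ [c]) := by
        intro hcon
        rcases infix_concat_cases g q c hcon with h | h
        · exact hq h
        · exact hend ((PySem.Chars.endswith_iff _ _).mpr h)
      have hstep : aStep g (cnt, q) c = (cnt, q ++ [c]) := by
        simp [aStep] at hend ⊢; simp [hend]
      rw [List.foldl_cons, hstep, hfull]
      exact ih (q ++ [c]) cnt (f + 1) hq' (by simp at hfuel ⊢; omega)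

-- A with empty gain: one removal per character, stack unchanged
theorem fold_empty_gain (cs : List Char) :
    ∀ (q : List Char) (cnt : Int),
      List.foldl (aStep []) (cnt, q) cs = (cnt + cs.length, q ++ cs) := by
  induction cs with
  | nil => intro q cnt; simp
  | cons c cs' ih =>
    intro q cnt
    have hstep : aStep [] (cnt, q) c = (cnt + 1, q ++ [c]) := by
      simp [aStep, PySem.Chars.endswith_iff, PySem.Chars.slice_eq_listSlice]
      have h1 : ((q.length : Int) + 1) = ((q.length + 1 : Nat) : Int) := by push_cast; ring
      rw [h1, PySem.List.slice_to_natCast]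
      simp
    rw [List.foldl_cons, hstep, ih]
    refine Prod.ext ?_ ?_ <;> simp <;> omega

theorem toList_nil_iff (s : String) : s.toList = [] ↔ s = "" := by
  constructor
  · intro h
    have := congrArg String.ofList h
    simpa using this
  · intro h; simp [h]

-- ===== VERDICT (by name: the statement is the Claim_ definition above) =====
theorem process_spec : Claim_unchanged_process := by
  intro s gain _
  unfold Spec_process
  intro hnd
  by_cases hg : gain = ""
  · have hs : s = "" := by
      by_contra hs
      exact hnd ⟨hg, hs⟩
    subst hg; subst hs; decide
  · have hg' : gain.toList ≠ [] := fun h => hg ((toList_nil_iff gain).mp h)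
    unfold process process_alt
    rw [if_neg hg']
    have := loop_eq gain.toList hg' s.toList [] 0 (s.toList.length + 1)
      (fun h => hg' (List.sublist_nil.mp h.sublist)) (by omega)
    simpa using congrArg (fun r : Int × List Char => (r.1, String.ofList r.2)) this

theorem process_changed : Claim_changed_process := by
  unfold Claim_changed_process; decide

theorem process_tight : Claim_exact_process := by
  intro s gain _ hd
  obtain ⟨hg, hs⟩ := hd
  subst hg
  have hlen : 0 < s.toList.length := by
    rcases Nat.eq_zero_or_pos s.toList.length with h | h
    · exact absurd ((toList_nil_iff s).mp (List.length_eq_zero_iff.mp h)) hs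
    · exact h
  have hA : (process s "").1 = (s.toList.length : Int) := by
    unfold process
    rw [show ("" : String).toList = [] from rfl, fold_empty_gain s.toList [] 0]
    simp
  have hB : (process_alt s "").1 = 0 := by
    unfold process_alt
    rw [if_pos (show ("" : String).toList = [] by decide)]
  intro hcon
  have := congrArg Prod.fst hcon
  rw [hA, hB] at this
  omega
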